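-- pv_equiv track=rewrite | github.com/arnargisla/tfbd-ch2 | ex1.py | exctract_words
-- ===== SOURCE A (Python) =====
-- def exctract_words(s):
--     symbols = ['\n','`','~','!','@','#','$','%','^','&','*','(',')','_','-','+','=','{','[',']','}','|','\\',':',';','"',"'",'<','>','.','?','/',',']
--     s = s.lower()
--     for sym in symbols:
--         s = s.replace(sym, " ")
--
--     words = set()
--     for w in s.split(" "):
--         if len(w.replace(" ","")) > 0:
--             words.add(w)
--     return words
-- ===== SOURCE B (Python) =====
-- def exctract_words(s):
--     delims = set('\n`~!@#$%^&*()_-+={[]}|\\:;"\'<>.?/, ')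
--     words = set()
--     buf = []
--     for ch in s.lower():
--         if ch in delims:
--             if buf:
--                 words.add("".join(buf))
--                 buf = []
--         else:
--             buf.append(ch)
--     if buf:
--         words.add("".join(buf))
--     return words
-- ===== Notes on version B (the rewrite author's own statement) =====
-- stated objective: alternative
-- what changed: B replaces A's 33 whole-string replace passes followed by a split-and-filter with a single character-by-character scan over s.lower() that flushes a token buffer into the set at each delimiter (the 33 symbols plus space); one pass over the data instead of 34, though CPython's C-level str.replace makes A fast in practice.
import Mathlib
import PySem

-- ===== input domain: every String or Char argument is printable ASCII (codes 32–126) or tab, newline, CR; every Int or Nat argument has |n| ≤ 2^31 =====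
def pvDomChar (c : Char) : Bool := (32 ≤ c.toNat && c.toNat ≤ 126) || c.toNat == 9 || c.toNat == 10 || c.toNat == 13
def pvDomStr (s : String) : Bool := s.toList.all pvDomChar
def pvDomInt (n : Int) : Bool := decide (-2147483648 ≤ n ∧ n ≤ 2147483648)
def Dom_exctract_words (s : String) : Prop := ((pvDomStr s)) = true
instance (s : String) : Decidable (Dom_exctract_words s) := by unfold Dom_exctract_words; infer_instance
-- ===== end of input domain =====

-- B replaces A's 33 whole-string replace passes plus split by ONE linear scan with a token buffer (objective: alternative, one pass instead of 34).

-- ===== PORT A =====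
def exctract_words (s : String) : List String :=
  let symbols : List String := ["\n","`","~","!","@","#","$","%","^","&","*","(",")","_","-","+","=","{","[","]","}","|","\\",":",";","\"","'","<",">",".","?","/",","]
  let s1 := symbols.foldl (fun t sym => PySem.Str.replace t sym " ") (PySem.Str.lower s)
  -- s1.split(" "): the separator is the nonempty literal " ", so split? is always `some`
  ((PySem.Str.split? s1 " ").getD []).foldl
    (fun words w =>
      if 0 < PySem.Str.len (PySem.Str.replace w " " "") then PySem.Set.add words w else words)
    PySem.Set.empty

-- ===== PORT B =====
-- the 33 symbols plus the space character (Source B's `delims`)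
def pvDelims : List Char := ['\n','`','~','!','@','#','$','%','^','&','*','(',')','_','-','+','=','{','[',']','}','|','\\',':',';','"','\'','<','>','.','?','/',',',' ']

-- Source B's single scan: flush the buffer into the set at each delimiter, and once at the end
def pvScan : List Char → List Char → PySem.Set String → PySem.Set String
  | [], buf, words => if buf.isEmpty then words else PySem.Set.add words (String.ofList buf)
  | c :: rest, buf, words =>
    if pvDelims.contains c then
      if buf.isEmpty then pvScan rest buf words
      else pvScan rest [] (PySem.Set.add words (String.ofList buf))
    else pvScan rest (buf ++ [c]) words

def exctract_words_alt (s : String) : List String :=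
  pvScan (PySem.Str.lower s).toList [] PySem.Set.empty

-- ===== PRECONDITION & SPEC =====
def Spec_exctract_words (s : String) (out : List String) : Prop := out = exctract_words_alt s
instance (s : String) (out : List String) : Decidable (Spec_exctract_words s out) := by unfold Spec_exctract_words; infer_instance

-- ===== CLAIM (what is proved, stated in full; the proofs are below) =====
def Claim_equal_exctract_words : Prop := ∀ (s : String), Dom_exctract_words s → Spec_exctract_words s (exctract_words s)

-- ===== LEMMAS AND PROOFS =====

-- the 33 symbol characters of A
def pvSyms : List Char := ['\n','`','~','!','@','#','$','%','^','&','*','(',')','_','-','+','=','{','[',']','}','|','\\',':',';','"','\'','<','>','.','?','/',',']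

-- what the 33 replace passes do to a single character
def pvRepl (c : Char) : Char := if pvSyms.contains c then ' ' else c

-- the body of A's filtering fold, at the char-list level
def pvStep (ws : PySem.Set String) (w : List Char) : PySem.Set String :=
  if 0 < PySem.Str.len (PySem.Str.replace (String.ofList w) " " "") then PySem.Set.add ws (String.ofList w) else ws

-- a clean top-down form of splitting on ' '
def pvSplitSp : List Char → List Char → List (List Char)
  | [], cur => [cur.reverse]
  | c :: rest, cur => if c = ' ' then cur.reverse :: pvSplitSp rest [] else pvSplitSp rest (c :: cur)

lemma pv_replace_go_single (a : Char) (new : List Char) :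
    ∀ (l : List Char) (fuel : Nat) (acc : List Char), l.length ≤ fuel →
      PySem.Chars.replace.go [a] new fuel l acc
        = acc.reverse ++ l.flatMap (fun c => if c = a then new else [c]) := by
  intro l
  induction l with
  | nil =>
    intro fuel acc _
    cases fuel <;> simp [PySem.Chars.replace.go]
  | cons c t ih =>
    intro fuel acc h
    cases fuel with
    | zero => simp at h
    | succ f =>
      simp only [PySem.Chars.replace.go]
      by_cases hc : c = a
      · subst hc
        simp [List.isPrefixOf, ih f _ (by simpa using h)]
      · have : List.isPrefixOf [a] (c :: t) = false := by
          simp [List.isPrefixOf]; exact fun h' => (hc h'.symm).elim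
        simp [this, ih f _ (by simpa using h), hc]

lemma pv_replace_single (t new : List Char) (a : Char) :
    PySem.Chars.replace t [a] new = t.flatMap (fun c => if c = a then new else [c]) := by
  simp [PySem.Chars.replace, pv_replace_go_single a new t t.length [] le_rfl]

lemma pv_foldl_replace (syms : List Char) (t : String) (h : ' ' ∉ syms) :
    (syms.foldl (fun u a => PySem.Str.replace u (String.ofList [a]) " ") t).toList
      = t.toList.map (fun c => if syms.contains c then ' ' else c) := by
  induction syms generalizing t with
  | nil => simp
  | cons a as ih =>
    have hsp : ' ' ∉ as := fun hm => h (List.mem_cons_of_mem _ hm)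
    have ha : a ≠ ' ' := fun he => h (he ▸ List.mem_cons_self ..)
    simp only [List.foldl_cons]
    rw [ih _ hsp]
    have : (PySem.Str.replace t (String.ofList [a]) " ").toList
        = t.toList.map (fun c => if c = a then ' ' else c) := by
      rw [PySem.Str.toList_replace]
      have h1 : (String.ofList [a]).toList = [a] := by simp
      have h2 : (" " : String).toList = [' '] := rfl
      rw [h1, h2, pv_replace_single]
      induction t.toList with
      | nil => rfl
      | cons c cs ihc => by_cases hc : c = a <;> simp [hc, ihc]
    rw [this, List.map_map]
    apply List.map_congr_left
    intro c _
    by_cases hc : c = a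
    · subst hc
      simp
    · simp [Function.comp, hc]

lemma pv_splitOn_go_sp :
    ∀ (l : List Char) (fuel : Nat), l.length ≤ fuel → ∀ (cur : List Char) (acc : List (List Char)),
      PySem.Chars.splitOn.go [' '] fuel l cur acc = acc.reverse ++ pvSplitSp l cur := by
  intro l
  induction l with
  | nil =>
    intro fuel _ cur acc
    cases fuel <;> simp [PySem.Chars.splitOn.go, pvSplitSp]
  | cons c rest ih =>
    intro fuel h cur acc
    cases fuel with
    | zero => simp at h
    | succ f =>
      simp only [PySem.Chars.splitOn.go]
      by_cases hc : c = ' '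
      · subst hc
        simp [List.isPrefixOf, ih f (by simpa using h), pvSplitSp]
      · have hp : List.isPrefixOf [' '] (c :: rest) = false := by
          simp [List.isPrefixOf]; exact fun h' => (hc h'.symm).elim
        simp [hp, ih f (by simpa using h), pvSplitSp, hc]

lemma pv_splitOn_sp (t : List Char) : PySem.Chars.splitOn t [' '] = pvSplitSp t [] := by
  simp [PySem.Chars.splitOn, pv_splitOn_go_sp t (t.length + 1) (by omega) [] []]

lemma pv_step_no_space (ws : PySem.Set String) (w : List Char) (h : ' ' ∉ w) :
    pvStep ws w = if w.isEmpty then ws else PySem.Set.add ws (String.ofList w) := by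
  have hrw : (PySem.Str.replace (String.ofList w) " " "").toList = w := by
    rw [PySem.Str.toList_replace]
    have h1 : (String.ofList w).toList = w := by simp
    rw [h1]
    show PySem.Chars.replace w [' '] [] = w
    rw [pv_replace_single]
    induction w with
    | nil => rfl
    | cons c cs ihc =>
      have : c ≠ ' ' := fun he => h (he ▸ List.mem_cons_self ..)
      simp [this, ihc (fun hm => h (List.mem_cons_of_mem _ hm))]
  unfold pvStep
  have hlen : PySem.Str.len (PySem.Str.replace (String.ofList w) " " "") = (w.length : Int) := by
    simp [PySem.Str.len, hrw]
  rw [hlen]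
  cases w <;> simp

lemma pv_delim_iff (c : Char) : pvDelims.contains c = true ↔ (c ∈ pvSyms ∨ c = ' ') := by
  show (pvSyms ++ [' ']).contains c = true ↔ _
  simp

lemma pv_scan_eq :
    ∀ (t buf : List Char) (ws : PySem.Set String), ' ' ∉ buf →
      pvScan t buf ws = (pvSplitSp (t.map pvRepl) buf.reverse).foldl pvStep ws := by
  intro t
  induction t with
  | nil =>
    intro buf ws h
    simp only [pvScan, List.map_nil, pvSplitSp, List.reverse_reverse, List.foldl]
    rw [pv_step_no_space ws buf h]
  | cons c rest ih =>
    intro buf ws h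
    simp only [pvScan, List.map_cons]
    by_cases hd : pvDelims.contains c = true
    · have hr : pvRepl c = ' ' := by
        rcases (pv_delim_iff c).1 hd with hs | hsp
        · simp [pvRepl, hs]
        · subst hsp; decide
      rw [hd, hr]
      simp only [if_true, pvSplitSp, List.reverse_reverse, List.foldl_cons]
      rw [pv_step_no_space ws buf h]
      by_cases hb : buf.isEmpty
      · have hbe : buf = [] := by simpa [List.isEmpty_iff] using hb
        subst hbe
        simpa using ih [] ws List.not_mem_nil
      · rw [if_neg hb, if_neg hb]
        simpa using ih [] _ List.not_mem_nil
    · have hc : c ≠ ' ' := fun he => hd ((pv_delim_iff c).2 (Or.inr he))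
      have hcs : c ∉ pvSyms := fun hs => hd ((pv_delim_iff c).2 (Or.inl hs))
      have hr : pvRepl c = c := by simp [pvRepl, hcs]
      rw [Bool.not_eq_true] at hd
      rw [hd, hr]
      simp only [pvSplitSp, if_neg hc, Bool.false_eq_true, ite_false]
      have hrev : c :: buf.reverse = (buf ++ [c]).reverse := by simp
      rw [hrev]
      have hnb : ' ' ∉ buf ++ [c] := by
        intro hm
        rcases List.mem_append.1 hm with hm | hm
        · exact h hm
        · have hce : ' ' = c := by simpa using hm
          exact hc hce.symm
      exact ih (buf ++ [c]) ws hnb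


-- ===== VERDICT (by name: the statement is the Claim_ definition above) =====
theorem exctract_words_spec : Claim_equal_exctract_words := by
  intro s _
  unfold Spec_exctract_words
  unfold exctract_words exctract_words_alt
  dsimp only
  have hlit : (["\n","`","~","!","@","#","$","%","^","&","*","(",")","_","-","+","=","{","[","]","}","|","\\",":",";","\"","'","<",">",".","?","/",","] : List String)
      = pvSyms.map (fun a => String.ofList [a]) := rfl
  rw [hlit, List.foldl_map]
  set s1 := pvSyms.foldl (fun u a => PySem.Str.replace u (String.ofList [a]) " ") (PySem.Str.lower s) with hs1def
  have hs1 : s1.toList = (PySem.Chars.lower s.toList).map pvRepl := by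
    rw [hs1def, pv_foldl_replace pvSyms _ (by decide), PySem.Str.toList_lower]
    rfl
  have hsplit : PySem.Str.split? s1 " "
      = some ((PySem.Chars.splitOn s1.toList [' ']).map String.ofList) := by
    simp [PySem.Str.split?, PySem.Chars.split?]
  rw [hsplit]
  simp only [Option.getD_some, List.foldl_map]
  show List.foldl pvStep PySem.Set.empty (PySem.Chars.splitOn s1.toList [' ']) = _
  rw [hs1, pv_splitOn_sp, PySem.Str.toList_lower,
    pv_scan_eq (PySem.Chars.lower s.toList) [] PySem.Set.empty List.not_mem_nil]
  rfl
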